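-- pv_equiv track=rewrite | github.com/zeniverse/-algorithm-practice | Programmers/Level0/컨트롤 제트.py | solution
-- ===== SOURCE A (Python) =====
-- def solution(s):
--     arr = []
--
--     for i in s.split():
--         if i.isalpha():
--             arr.pop(-1)
--         else:
--             arr.append(int(i))
--
--     return sum(arr)
-- ===== SOURCE B (Python) =====
-- def solution(s):
--     total = skip = 0
--     for tok in reversed(s.split()):
--         if tok.isalpha():
--             skip += 1
--         else:
--             v = int(tok)
--             if skip:
--                 skip -= 1
--             else:
--                 total += v
--     if skip:
--         raise IndexError("undo with nothing to undo")
--     return total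
-- ===== Notes on version B (the rewrite author's own statement) =====
-- stated objective: alternative
-- what changed: Replaces the stack (append/pop then sum) by a single reverse scan keeping only an undo counter and a running total, so no list is ever built; like A it raises on unparsable tokens and on an undo with nothing to undo.
import Mathlib
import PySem

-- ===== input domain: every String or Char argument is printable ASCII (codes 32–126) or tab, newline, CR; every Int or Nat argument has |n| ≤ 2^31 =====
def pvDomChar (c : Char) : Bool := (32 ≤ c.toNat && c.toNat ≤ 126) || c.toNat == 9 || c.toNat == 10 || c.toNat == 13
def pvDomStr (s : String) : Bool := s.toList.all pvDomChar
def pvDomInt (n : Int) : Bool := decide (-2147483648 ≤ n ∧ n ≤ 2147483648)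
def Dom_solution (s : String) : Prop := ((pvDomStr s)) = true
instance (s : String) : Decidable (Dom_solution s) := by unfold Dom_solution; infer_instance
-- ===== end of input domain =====

-- B replaces A's stack (append/pop then sum) by one reverse scan with an undo counter
-- and a running total; like A it raises on unparsable tokens and on a pop/undo with
-- nothing to undo (those inputs are outside Pre_solution).

-- ===== PORT A =====
-- one loop step of A: pop the last element on an alphabetic token, else append int(i); none = exception
def solutionStep (acc : Option (List Int)) (t : String) : Option (List Int) :=
  acc.bind (fun arr =>
    if PySem.Str.strIsalpha t then
      (PySem.List.pop? arr (-1)).map (fun pr => pr.2)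
    else
      (PySem.Int.ofStr? t).map (fun n => arr ++ [n]))

def solution (s : String) : Int :=
  match (PySem.Str.split₀ s).foldl solutionStep (some []) with
  | some arr => arr.sum
  | none => 0    -- unreachable under Pre_solution (Python raises here)

-- ===== PORT B =====
-- one loop step of B over the reversed token list: state (skip, total)
def solutionAltStep (st : Int × Int) (t : String) : Int × Int :=
  if PySem.Str.strIsalpha t then (st.1 + 1, st.2)
  else
    let v := (PySem.Int.ofStr? t).getD 0   -- v = int(tok); int(tok) raises outside Pre_solution
    if st.1 ≠ 0 then (st.1 - 1, st.2) else (st.1, st.2 + v)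

-- the final 'if skip: raise IndexError' fires only outside Pre_solution
def solution_alt (s : String) : Int :=
  ((PySem.Str.split₀ s).reverse.foldl solutionAltStep (0, 0)).2

-- ===== PRECONDITION & SPEC =====
-- counts of alphabetic (pop) and non-alphabetic (push) tokens
def pvCntA (ts : List String) : Nat := (ts.filter (fun t => PySem.Str.strIsalpha t)).length
def pvCntN (ts : List String) : Nat := (ts.filter (fun t => ¬ PySem.Str.strIsalpha t)).length

-- Pre_ excludes exactly the inputs on which Python A raises: a token that is neither
-- alphabetic nor an int literal (ValueError), or a prefix with more pops than pushes (IndexError).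
def Pre_solution (s : String) : Prop :=
  (∀ t ∈ PySem.Str.split₀ s, PySem.Str.strIsalpha t = true ∨ (PySem.Int.ofStr? t).isSome) ∧
  (∀ k < (PySem.Str.split₀ s).length,
      pvCntA ((PySem.Str.split₀ s).take (k+1)) ≤ pvCntN ((PySem.Str.split₀ s).take (k+1)))
instance (s : String) : Decidable (Pre_solution s) := by unfold Pre_solution; infer_instance

def pvWitness_solution : String := "1 2 Z 3"

def Spec_solution (s : String) (out : Int) : Prop := out = solution_alt s
instance (s : String) (out : Int) : Decidable (Spec_solution s out) := by unfold Spec_solution; infer_instance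

-- ===== CLAIM (what is proved, stated in full; the proofs are below) =====
def Claim_equal_solution : Prop := ∀ (s : String), Dom_solution s → Pre_solution s → Spec_solution s (solution s)

-- ===== LEMMAS AND PROOFS =====

theorem pvCntA_nil : pvCntA [] = 0 := rfl
theorem pvCntN_nil : pvCntN [] = 0 := rfl

-- B's fold consumes the head token of ts last
theorem altFold_cons (t : String) (ts : List String) :
    (t :: ts).reverse.foldl solutionAltStep (0, 0)
      = solutionAltStep (ts.reverse.foldl solutionAltStep (0, 0)) t := by
  rw [List.reverse_cons, List.foldl_append, List.foldl_cons, List.foldl_nil]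

theorem altStep_alpha (r : Int × Int) (t : String) (h : PySem.Str.strIsalpha t = true) :
    solutionAltStep r t = (r.1 + 1, r.2) := by
  simp only [solutionAltStep]; rw [if_pos h]

theorem altStep_pop (r : Int × Int) (t : String) (h : ¬ PySem.Str.strIsalpha t = true)
    (hz : r.1 ≠ 0) : solutionAltStep r t = (r.1 - 1, r.2) := by
  simp only [solutionAltStep]; rw [if_neg h, if_pos hz]

theorem altStep_add (r : Int × Int) (t : String) (h : ¬ PySem.Str.strIsalpha t = true)
    (hz : ¬ r.1 ≠ 0) : solutionAltStep r t = (r.1, r.2 + ((PySem.Int.ofStr? t).getD 0)) := by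
  simp only [solutionAltStep]; rw [if_neg h, if_neg hz]

theorem altFold_skip_nonneg (ts : List String) :
    0 ≤ (ts.reverse.foldl solutionAltStep (0, 0)).1 := by
  induction ts with
  | nil => simp
  | cons t ts ih =>
    rw [altFold_cons]
    by_cases h : PySem.Str.strIsalpha t = true
    · rw [altStep_alpha _ _ h]; dsimp only; omega
    · by_cases hz : (ts.reverse.foldl solutionAltStep (0, 0)).1 ≠ 0
      · rw [altStep_pop _ _ h hz]; dsimp only; omega
      · rw [altStep_add _ _ h hz]; dsimp only; omega

theorem pvCntA_cons_alpha (t : String) (l : List String) (h : PySem.Str.strIsalpha t = true) :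
    pvCntA (t :: l) = pvCntA l + 1 := by
  have h' : PySem.Chars.strIsalpha t.toList = true := by simpa using h
  simp [pvCntA, h']
theorem pvCntA_cons_num (t : String) (l : List String) (h : ¬ PySem.Str.strIsalpha t = true) :
    pvCntA (t :: l) = pvCntA l := by
  have h' : PySem.Chars.strIsalpha t.toList = false := by simpa using h
  simp [pvCntA, h']
theorem pvCntN_cons_alpha (t : String) (l : List String) (h : PySem.Str.strIsalpha t = true) :
    pvCntN (t :: l) = pvCntN l := by
  have h' : PySem.Chars.strIsalpha t.toList = true := by simpa using h
  simp [pvCntN, h']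
theorem pvCntN_cons_num (t : String) (l : List String) (h : ¬ PySem.Str.strIsalpha t = true) :
    pvCntN (t :: l) = pvCntN l + 1 := by
  have h' : PySem.Chars.strIsalpha t.toList = false := by simpa using h
  simp [pvCntN, h']

-- main invariant: from any start stack st, A's fold succeeds and its stack sums to
-- (the part of st not consumed by B's leftover undo counter) + B's running total
theorem main_inv (ts : List String) :
    ∀ (st : List Int),
      (∀ t ∈ ts, PySem.Str.strIsalpha t = true ∨ (PySem.Int.ofStr? t).isSome) →
      (∀ k < ts.length, pvCntA (ts.take (k+1)) ≤ st.length + pvCntN (ts.take (k+1))) →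
      (ts.reverse.foldl solutionAltStep (0, 0)).1 ≤ (st.length : Int) ∧
      (∃ arr, ts.foldl solutionStep (some st) = some arr ∧
        arr.sum = (st.take (st.length - (ts.reverse.foldl solutionAltStep (0, 0)).1.toNat)).sum
                    + (ts.reverse.foldl solutionAltStep (0, 0)).2) := by
  induction ts with
  | nil =>
    intro st _ _
    exact ⟨by simp, st, by simp, by simp⟩
  | cons t ts ih =>
    intro st hparse hbal
    rw [altFold_cons]
    have hsk := altFold_skip_nonneg ts
    by_cases ha : PySem.Str.strIsalpha t = true
    · -- alphabetic token: pop the last element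
      have hlen : 1 ≤ st.length := by
        by_contra hc
        have hst : st = [] := List.length_eq_zero_iff.mp (by omega)
        have h0 := hbal 0 (by simp)
        have h1 : List.take (0+1) (t :: ts) = [t] := by simp
        rw [h1, hst, pvCntA_cons_alpha t [] ha, pvCntN_cons_alpha t [] ha,
          pvCntA_nil, pvCntN_nil, List.length_nil] at h0
        omega
      have hne : st ≠ [] := by intro h; rw [h] at hlen; simp at hlen
      have hstep : solutionStep (some st) t = some st.dropLast := by
        conv_lhs => rw [← List.dropLast_append_getLast hne]
        simp only [solutionStep, Option.bind_some]
        rw [if_pos ha, PySem.List.pop?_last]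
        simp
      have hbal' : ∀ k < ts.length,
          pvCntA (ts.take (k+1)) ≤ st.dropLast.length + pvCntN (ts.take (k+1)) := by
        intro k hk
        have h1 := hbal (k+1) (by simpa using Nat.succ_lt_succ hk)
        rw [List.take_succ_cons, pvCntA_cons_alpha t _ ha, pvCntN_cons_alpha t _ ha] at h1
        rw [List.length_dropLast]
        omega
      obtain ⟨hle, arr, harr, hsum⟩ := ih st.dropLast
        (fun u hu => hparse u (by simp [hu])) hbal'
      rw [List.length_dropLast] at hle
      rw [altStep_alpha _ _ ha]
      set r := ts.reverse.foldl solutionAltStep (0, 0) with hr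
      refine ⟨by dsimp only; omega, arr, ?_, ?_⟩
      · rw [List.foldl_cons, hstep]; exact harr
      · rw [hsum]
        dsimp only
        have e1 : (r.1 + 1).toNat = r.1.toNat + 1 := by omega
        have e2 : st.dropLast.take (st.dropLast.length - r.1.toNat)
            = st.take (st.length - (r.1.toNat + 1)) := by
          rw [List.length_dropLast, List.dropLast_eq_take, List.take_take,
            Nat.min_eq_left (by omega)]
          congr 1
          omega
        rw [e1, e2]
    · -- number token: append its value
      have hn : (PySem.Int.ofStr? t).isSome := by
        rcases hparse t (by simp) with h | h
        · exact absurd h ha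
        · exact h
      obtain ⟨n, hn⟩ := Option.isSome_iff_exists.mp hn
      have hstep : solutionStep (some st) t = some (st ++ [n]) := by
        simp only [solutionStep, Option.bind_some]
        rw [if_neg ha, hn]
        simp
      have hbal' : ∀ k < ts.length,
          pvCntA (ts.take (k+1)) ≤ (st ++ [n]).length + pvCntN (ts.take (k+1)) := by
        intro k hk
        have h1 := hbal (k+1) (by simpa using Nat.succ_lt_succ hk)
        rw [List.take_succ_cons, pvCntA_cons_num t _ ha, pvCntN_cons_num t _ ha] at h1
        rw [List.length_append]
        simp only [List.length_cons, List.length_nil]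
        omega
      obtain ⟨hle, arr, harr, hsum⟩ := ih (st ++ [n])
        (fun u hu => hparse u (by simp [hu])) hbal'
      rw [List.length_append] at hle
      simp only [List.length_cons, List.length_nil, Nat.cast_add, Nat.cast_one, Nat.cast_zero] at hle
      set r := ts.reverse.foldl solutionAltStep (0, 0) with hr
      by_cases hz : r.1 ≠ 0
      · -- a leftover undo cancels n
        rw [altStep_pop _ _ ha hz]
        refine ⟨by dsimp only; omega, arr, ?_, ?_⟩
        · rw [List.foldl_cons, hstep]; exact harr
        · rw [hsum]
          dsimp only
          have e1 : (r.1 - 1).toNat = r.1.toNat - 1 := by omega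
          have e2 : (st ++ [n]).take ((st ++ [n]).length - r.1.toNat)
              = st.take (st.length - (r.1.toNat - 1)) := by
            rw [List.length_append]
            simp only [List.length_cons, List.length_nil]
            rw [List.take_append_of_le_length (by omega)]
            congr 1
            omega
          rw [e1, e2]
      · -- no leftover undo: n survives and joins the total
        rw [altStep_add _ _ ha hz]
        refine ⟨by dsimp only; omega, arr, ?_, ?_⟩
        · rw [List.foldl_cons, hstep]; exact harr
        · rw [hsum]
          dsimp only
          have hz0 : r.1 = 0 := by omega
          have e2 : (st ++ [n]).take ((st ++ [n]).length - r.1.toNat) = st ++ [n] := by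
            rw [hz0]; simp
          have e3 : st.take (st.length - r.1.toNat) = st := by rw [hz0]; simp
          rw [e2, e3, hn]
          simp [List.sum_append]
          ring

-- ===== VERDICT (by name: the statement is the Claim_ definition above) =====
theorem solution_spec : Claim_equal_solution := by
  intro s _ hpre
  unfold Spec_solution
  obtain ⟨hle, arr, harr, hsum⟩ := main_inv (PySem.Str.split₀ s) [] hpre.1 (by simpa using hpre.2)
  unfold solution solution_alt
  rw [harr]
  simpa using hsum
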